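-- pv_equiv track=rewrite | github.com/Omkarprakashchavan/tarun-repo-1 | repo-ops.py | get_reporting_chain_level_num
-- ===== SOURCE A (Python) =====
-- from typing import Dict, List, Tuple, Union
--
-- def get_reporting_chain_level_num(user_email: str, mgr_info: Dict[str, str]) -> int:
--     """
--     Return the level number of the specified user in the reporting chain.
--      . level 0 is the CEO
--      . level 1 is the CEO's direct report
--      . level 2 is the direct report of the CEO's direct report
--      ... and so on.
--     """
--
--     if user_email == '-unknown-':
--         return 999
--
--     def construct_report_chain(user_email, chain=None):
--         """
--         Construct the reporting chain, starting from the specified user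
--         up to the CEO.
--         """
--
--         if chain is None:
--             chain = []
--         chain.append(user_email)  # build up the reporting chain
--         if user_email == mgr_info[user_email]:
--             # we've reached the top
--             return chain
--         else:
--             # recursively go up the chain of command
--             return construct_report_chain(mgr_info[user_email], chain)
--
--     # the first item in the list is the specified user
--     # and the last item is the CEO
--     report_chain = construct_report_chain(user_email)
--
--     report_chain_level: Dict[str, int] = {}
--     # reverse the reporting chain to construct a mapping
--     # of email address -> reporting level
--     # with level 0 being the CEO and the last level being the specified user
--     for level, email_addr in enumerate(reversed(report_chain)):
--         report_chain_level[email_addr] = level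
--         # logger.debug(f'> {email_addr}: {level}')
--
--     return report_chain_level[user_email]
-- ===== SOURCE B (Python) =====
-- def get_reporting_chain_level_num(user_email, mgr_info):
--     """
--     Return the level number of the specified user in the reporting chain
--     (level 0 = CEO).  Bounded walk: a reporting chain that terminates has
--     at most len(mgr_info) edges, so a fixed-count for-loop with a break at
--     the self-managed CEO replaces the recursive chain list + level dict.
--     """
--     if user_email == '-unknown-':
--         return 999
--     level = 0
--     for _ in range(len(mgr_info) + 1):
--         boss = mgr_info[user_email]
--         if boss == user_email:
--             break
--         user_email = boss
--         level += 1
--     return level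
-- ===== Notes on version B (the rewrite author's own statement) =====
-- stated objective: simpler
-- what changed: Replaced the recursive chain-list construction plus the reversed-enumerate email->level dict with a bounded for-loop (at most len(mgr_info)+1 iterations) that just counts steps up to the self-managed CEO and breaks there.
import Mathlib
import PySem

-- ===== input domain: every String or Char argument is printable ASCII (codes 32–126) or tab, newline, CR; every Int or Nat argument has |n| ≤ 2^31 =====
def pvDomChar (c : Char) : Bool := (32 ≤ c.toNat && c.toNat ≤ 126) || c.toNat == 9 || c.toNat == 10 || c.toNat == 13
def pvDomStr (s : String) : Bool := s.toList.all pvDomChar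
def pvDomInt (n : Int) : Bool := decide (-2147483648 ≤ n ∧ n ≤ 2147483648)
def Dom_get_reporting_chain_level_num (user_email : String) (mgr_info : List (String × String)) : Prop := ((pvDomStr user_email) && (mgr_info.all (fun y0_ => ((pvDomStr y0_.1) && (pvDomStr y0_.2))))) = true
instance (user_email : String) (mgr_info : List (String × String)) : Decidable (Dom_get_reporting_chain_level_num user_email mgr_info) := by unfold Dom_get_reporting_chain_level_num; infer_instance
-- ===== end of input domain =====

-- B replaces A's recursive chain-list + reversed-enumerate level dict by a bounded counting
-- for-loop with a break at the CEO (simpler; return-value equivalence on Pre_, where A returns).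

-- ===== PORT A =====
-- construct_report_chain: recursion on fuel (Python recursion terminates only when the walk
-- reaches a self-managed CEO; mgr_info.length + 1 fuel suffices then; none = KeyError or
-- exhausted fuel, both excluded by Pre_).
def pvChainA (mgr_info : List (String × String)) : Nat → String → List String → Option (List String)
  | 0, _, _ => none
  | fuel + 1, e, chain =>
    let chain := chain ++ [e]
    match (PySem.Dict.mk mgr_info).get? e with
    | none => none
    | some mg => if e = mg then some chain else pvChainA mgr_info fuel mg chain

def get_reporting_chain_level_num (user_email : String) (mgr_info : List (String × String)) : Int :=
  if user_email = "-unknown-" then 999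
  else
    match pvChainA mgr_info (mgr_info.length + 1) user_email [] with
    | none => 0  -- unreachable under Pre_ (Python raises here)
    | some report_chain =>
      let report_chain_level : PySem.Dict String Int :=
        (PySem.List.enumerate report_chain.reverse).foldl
          (fun d p => d.insert p.2 p.1) PySem.Dict.empty
      (report_chain_level.get? user_email).getD 0  -- get? is some under Pre_

-- ===== PORT B =====
-- loop state: (some current_email, level) while running; (none, level) once the break fired
-- or a lookup missed (KeyError — excluded by Pre_, where the break always fires first)
def pvStepB (mgr_info : List (String × String)) (st : Option String × Int) : Option String × Int :=
  match st with
  | (some e, level) =>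
    match (PySem.Dict.mk mgr_info).get? e with
    | none => (none, level)
    | some boss => if boss = e then (none, level) else (some boss, level + 1)
  | (none, level) => (none, level)

def get_reporting_chain_level_num_alt (user_email : String) (mgr_info : List (String × String)) : Int :=
  if user_email = "-unknown-" then 999
  else
    ((PySem.List.pyRange 0 ((mgr_info.length : Int) + 1) 1).foldl
      (fun st _ => pvStepB mgr_info st) (some user_email, (0 : Int))).2

-- ===== PRECONDITION & SPEC =====
-- iterate the manager lookup n steps (none as soon as a lookup misses)
def pvIterMgr (mgr_info : List (String × String)) : Nat → String → Option String
  | 0, e => some e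
  | n + 1, e =>
    match (PySem.Dict.mk mgr_info).get? e with
    | none => none
    | some mg => pvIterMgr mgr_info n mg

-- Pre_: A returns normally iff user is '-unknown-' or the managerial chain from the user,
-- with every lookup present, reaches a self-managed CEO within len(mgr_info) steps
-- (otherwise Python raises KeyError or RecursionError).
def Pre_get_reporting_chain_level_num (user_email : String) (mgr_info : List (String × String)) : Prop :=
  user_email = "-unknown-" ∨
    ∃ n ≤ mgr_info.length, ∃ e, pvIterMgr mgr_info n user_email = some e ∧
      (PySem.Dict.mk mgr_info).get? e = some e

instance (user_email : String) (mgr_info : List (String × String)) : Decidable (Pre_get_reporting_chain_level_num user_email mgr_info) := by unfold Pre_get_reporting_chain_level_num; infer_instance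

def pvWitness_get_reporting_chain_level_num : String × (List (String × String)) :=
  ("bob@x.com", [("ceo@x.com", "ceo@x.com"), ("bob@x.com", "ceo@x.com")])

def Spec_get_reporting_chain_level_num (user_email : String) (mgr_info : List (String × String)) (out : Int) : Prop := out = get_reporting_chain_level_num_alt user_email mgr_info
instance (user_email : String) (mgr_info : List (String × String)) (out : Int) : Decidable (Spec_get_reporting_chain_level_num user_email mgr_info out) := by unfold Spec_get_reporting_chain_level_num; infer_instance

-- ===== CLAIM (what is proved, stated in full; the proofs are below) =====
def Claim_equal_get_reporting_chain_level_num : Prop := ∀ (user_email : String) (mgr_info : List (String × String)), Dom_get_reporting_chain_level_num user_email mgr_info → Pre_get_reporting_chain_level_num user_email mgr_info → Spec_get_reporting_chain_level_num user_email mgr_info (get_reporting_chain_level_num user_email mgr_info)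

-- ===== LEMMAS AND PROOFS =====

-- proof-only helper: number of steps from e to the first self-managed email, fuel-bounded
def pvSteps (mgr_info : List (String × String)) : Nat → String → Option Int
  | 0, _ => none
  | fuel + 1, e =>
    match (PySem.Dict.mk mgr_info).get? e with
    | none => none
    | some mg => if e = mg then some 0 else (pvSteps mgr_info fuel mg).map (· + 1)

-- if the chain reaches a fixed point in n < fuel steps, pvSteps returns a value
theorem pvSteps_some_of_iter (mgr_info : List (String × String)) :
    ∀ (n fuel : Nat) (u e : String), n < fuel →
      pvIterMgr mgr_info n u = some e → (PySem.Dict.mk mgr_info).get? e = some e →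
      ∃ k, pvSteps mgr_info fuel u = some k := by
  intro n
  induction n with
  | zero =>
    intro fuel u e hf hit hfix
    obtain ⟨f, rfl⟩ : ∃ f, fuel = f + 1 := ⟨fuel - 1, by omega⟩
    simp [pvIterMgr] at hit
    subst hit
    exact ⟨0, by simp [pvSteps, hfix]⟩
  | succ n ih =>
    intro fuel u e hf hit hfix
    obtain ⟨f, rfl⟩ : ∃ f, fuel = f + 1 := ⟨fuel - 1, by omega⟩
    simp only [pvIterMgr] at hit
    cases hg : (PySem.Dict.mk mgr_info).get? u with
    | none => simp [hg] at hit
    | some mg =>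
      rw [hg] at hit
      by_cases hum : u = mg
      · subst hum; exact ⟨0, by simp [pvSteps, hg]⟩
      · obtain ⟨k, hk⟩ := ih f mg e (by omega) hit hfix
        exact ⟨k + 1, by simp [pvSteps, hg, hum, hk]⟩

-- when pvSteps returns k, A's chain builder returns acc ++ e :: tail with tail.length = k
theorem pvChainA_of_steps (mgr_info : List (String × String)) :
    ∀ (fuel : Nat) (e : String) (acc : List String) (k : Int),
      pvSteps mgr_info fuel e = some k →
      ∃ tail, pvChainA mgr_info fuel e acc = some (acc ++ e :: tail) ∧ (tail.length : Int) = k := by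
  intro fuel
  induction fuel with
  | zero => intro e acc k h; simp [pvSteps] at h
  | succ f ih =>
    intro e acc k h
    simp only [pvSteps] at h
    cases hg : (PySem.Dict.mk mgr_info).get? e with
    | none => simp [hg] at h
    | some mg =>
      rw [hg] at h
      by_cases hem : e = mg
      · subst hem
        simp at h
        exact ⟨[], by simp [pvChainA, hg, ← h]⟩
      · simp only [if_neg hem, Option.map_eq_some_iff] at h
        obtain ⟨k', hk', rfl⟩ := h
        obtain ⟨tail, hch, hlen⟩ := ih mg (acc ++ [e]) k' hk'
        refine ⟨mg :: tail, ?_, ?_⟩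
        · simp only [pvChainA, hg, if_neg hem]
          rw [hch]; simp
        · simp [← hlen]

-- looking up the head of the chain in the dict built from enumerate(reversed(chain))
-- yields the last insert for that key: length - 1
theorem pvDict_lookup_head (ch : List String) (u : String) (tail : List String)
    (hch : ch = u :: tail) :
    (((PySem.List.enumerate ch.reverse).foldl
        (fun d p => d.insert p.2 p.1) (PySem.Dict.empty : PySem.Dict String Int)).get? u)
      = some (tail.length : Int) := by
  subst hch
  have hrev : (u :: tail).reverse = tail.reverse ++ [u] := by simp
  rw [hrev, PySem.List.enumerate_append, List.foldl_append]
  simp [PySem.List.enumerate, PySem.Dict.get?_insert_self]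

-- B's fold ignores the range elements: it is iteration of pvStepB, length-many times
theorem pvFoldB_eq_iterate (mgr_info : List (String × String)) :
    ∀ (l : List Int) (st : Option String × Int),
      l.foldl (fun st _ => pvStepB mgr_info st) st = (pvStepB mgr_info)^[l.length] st := by
  intro l
  induction l with
  | nil => intro st; simp
  | cons a l ih =>
    intro st
    simp [List.foldl_cons, ih, Function.iterate_succ_apply]

-- a finished state (break fired / lookup missed) is a fixed point of the loop body
theorem pvStepB_iterate_none (mgr_info : List (String × String)) (lvl : Int) :
    ∀ n, (pvStepB mgr_info)^[n] (none, lvl) = (none, lvl) := by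
  intro n
  induction n with
  | zero => rfl
  | succ n ih => rw [Function.iterate_succ_apply, pvStepB]; exact ih

-- iterating the loop body fuel times from a running state adds pvSteps to the level
theorem pvIterate_of_steps (mgr_info : List (String × String)) :
    ∀ (fuel : Nat) (u : String) (lvl k : Int),
      pvSteps mgr_info fuel u = some k →
      (pvStepB mgr_info)^[fuel] (some u, lvl) = (none, lvl + k) := by
  intro fuel
  induction fuel with
  | zero => intro u lvl k h; simp [pvSteps] at h
  | succ f ih =>
    intro u lvl k h
    simp only [pvSteps] at h
    rw [Function.iterate_succ_apply]
    cases hg : (PySem.Dict.mk mgr_info).get? u with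
    | none => simp [hg] at h
    | some mg =>
      rw [hg] at h
      by_cases hum : u = mg
      · simp only [if_pos hum] at h
        obtain rfl : (0 : Int) = k := by simpa using h
        simp only [pvStepB, hg, if_pos hum.symm]
        simpa using pvStepB_iterate_none mgr_info lvl f
      · simp only [if_neg hum, Option.map_eq_some_iff] at h
        obtain ⟨k', hk', rfl⟩ := h
        have hne : ¬ mg = u := fun hh => hum hh.symm
        simp only [pvStepB, hg, if_neg hne]
        rw [ih mg (lvl + 1) k' hk']
        ring_nf

theorem get_reporting_chain_level_num_spec : Claim_equal_get_reporting_chain_level_num := by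
  intro u m _ hpre
  unfold Spec_get_reporting_chain_level_num
  unfold get_reporting_chain_level_num get_reporting_chain_level_num_alt
  by_cases hu : u = "-unknown-"
  · simp [hu]
  · rcases hpre with h9 | ⟨n, hn, e, hit, hfix⟩
    · exact absurd h9 hu
    obtain ⟨k, hk⟩ := pvSteps_some_of_iter m n (m.length + 1) u e (by omega) hit hfix
    obtain ⟨tail, hch, hlen⟩ := pvChainA_of_steps m (m.length + 1) u [] k hk
    simp only [if_neg hu]
    rw [hch]
    simp only [List.nil_append]
    rw [pvDict_lookup_head (u :: tail) u tail rfl]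
    rw [pvFoldB_eq_iterate]
    have hlenR : (PySem.List.pyRange 0 ((m.length : Int) + 1) 1).length = m.length + 1 := by
      rw [PySem.List.length_pyRange_one]; omega
    rw [hlenR, pvIterate_of_steps m (m.length + 1) u 0 k hk]
    simp [hlen]
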